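-- pv_equiv track=rewrite | github.com/bonafidecrunker/COSC448 | CourseraFxns.py | symbol_array
-- ===== SOURCE A (Python) =====
-- def pattern_count(pattern, text):
--     count = 0
--     for i in range(len(text) - len(pattern) + 1):
--         if text[i: i + len(pattern)] == pattern:
--             count = count + 1
--     return count
--
-- def symbol_array(genome, symbol):
--     array = {}
--     n = len(genome)
--     ext_gen = genome + genome[0: n // 2]
--
--     array[0] = pattern_count(symbol, genome[0: n // 2])
--
--     for i in range(1, n):
--         array[i] = array[i - 1]
--         if ext_gen[i - 1] == symbol:
--             array[i] -= 1
--         if ext_gen[i + (n // 2) - 1] == symbol: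
--             array[i] += 1
--
--     return array
-- ===== SOURCE B (Python) =====
-- def pattern_count(pattern, text):
--     count = 0
--     for i in range(len(text) - len(pattern) + 1):
--         if text[i: i + len(pattern)] == pattern:
--             count = count + 1
--     return count
--
-- def symbol_array(genome, symbol):
--     n = len(genome)
--     half = n // 2
--     ext = genome + genome[:half]
--     # prefix table: pref[k] = number of positions j < k with ext[j] == symbol
--     pref = [0]
--     total = 0
--     for ch in ext:
--         total += (ch == symbol)
--         pref.append(total)
--     base = pattern_count(symbol, genome[:half])
--     arr = {0: base}
--     for i in range(1, n):
--         arr[i] = base - pref[i] + pref[i + half] - pref[half]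
--     return arr
-- ===== Notes on version B (the rewrite author's own statement) =====
-- stated objective: alternative
-- what changed: B replaces A's value-carrying recurrence (each window count derived from the previous entry via two comparisons) with a prefix-count table over the extended genome, computing every entry independently in closed form from the table.
import Mathlib
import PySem

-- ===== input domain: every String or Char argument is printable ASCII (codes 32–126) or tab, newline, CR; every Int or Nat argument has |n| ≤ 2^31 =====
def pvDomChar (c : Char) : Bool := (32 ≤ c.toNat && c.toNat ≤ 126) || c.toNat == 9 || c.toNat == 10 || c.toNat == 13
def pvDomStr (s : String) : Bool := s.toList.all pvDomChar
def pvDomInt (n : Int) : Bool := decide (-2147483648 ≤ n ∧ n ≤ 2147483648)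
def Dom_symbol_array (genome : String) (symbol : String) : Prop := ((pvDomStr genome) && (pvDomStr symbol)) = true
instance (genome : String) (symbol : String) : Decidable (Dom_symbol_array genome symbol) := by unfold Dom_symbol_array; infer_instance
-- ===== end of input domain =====

-- B replaces A's value-carrying recurrence (each entry from the previous one) by a prefix-count table
-- consulted directly per index; equivalence of the return values is proved (alternative decomposition).

-- ===== PORT A =====
-- shared module helper pattern_count (identical in Source A and Source B)
def pattern_count (pattern text : List Char) : Int :=
  (PySem.List.pyRange 0 ((text.length : Int) - (pattern.length : Int) + 1) 1).foldl
    (fun count i =>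
      if PySem.List.slice text (some i) (some (i + (pattern.length : Int))) = pattern
      then count + 1 else count) 0

-- one iteration of A's loop body (array[i] = array[i-1]; two single-char comparisons adjust it);
-- array[i-1] is always present when the loop runs, so getD's default is never used
def pvStepA (ext s : List Char) (half : Int) (d : PySem.Dict Int Int) (i : Int) : PySem.Dict Int Int :=
  let v0 := d.getD (i - 1) 0
  let v1 := if (PySem.List.pyGet? ext (i - 1)).map (fun c => [c]) = some s then v0 - 1 else v0
  let v2 := if (PySem.List.pyGet? ext (i + half - 1)).map (fun c => [c]) = some s then v1 + 1 else v1
  d.insert i v2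

def symbol_array (genome : String) (symbol : String) : List (Int × Int) :=
  let g := genome.toList
  let s := symbol.toList
  let n : Int := (g.length : Int)
  let half := PySem.Int.floordiv n 2
  let ext := g ++ PySem.List.slice g (some 0) (some half)
  let d0 : PySem.Dict Int Int :=
    PySem.Dict.empty.insert 0 (pattern_count s (PySem.List.slice g (some 0) (some half)))
  ((PySem.List.pyRange 1 n 1).foldl (pvStepA ext s half) d0).items

-- ===== PORT B =====
-- pref[i] ; indices used by B's loop are always in range, so getD's default is never used
def pvPref (pref : List Int) (i : Int) : Int := (PySem.List.pyGet? pref i).getD 0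

-- one iteration of B's loop body: the entry is computed directly from the prefix table
def pvStepB (pref : List Int) (base half : Int) (d : PySem.Dict Int Int) (i : Int) : PySem.Dict Int Int :=
  d.insert i (base - pvPref pref i + pvPref pref (i + half) - pvPref pref half)

def symbol_array_alt (genome : String) (symbol : String) : List (Int × Int) :=
  let g := genome.toList
  let s := symbol.toList
  let n := g.length
  let half := n / 2
  let ext := g ++ g.take half
  -- the running-total loop building pref ([0] then one partial sum per character)
  let pref : List Int := ext.scanl (fun t c => t + (if [c] = s then 1 else 0)) 0
  let base := pattern_count s (g.take half)
  let d0 : PySem.Dict Int Int := PySem.Dict.empty.insert 0 base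
  ((PySem.List.pyRange 1 (n : Int) 1).foldl (pvStepB pref base (half : Int)) d0).items

-- ===== PRECONDITION & SPEC =====
def Spec_symbol_array (genome : String) (symbol : String) (out : List (Int × Int)) : Prop := out = symbol_array_alt genome symbol
instance (genome : String) (symbol : String) (out : List (Int × Int)) : Decidable (Spec_symbol_array genome symbol out) := by unfold Spec_symbol_array; infer_instance

-- ===== CLAIM (what is proved, stated in full; the proofs are below) =====
def Claim_equal_symbol_array : Prop := ∀ (genome : String) (symbol : String), Dom_symbol_array genome symbol → Spec_symbol_array genome symbol (symbol_array genome symbol)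

-- ===== LEMMAS AND PROOFS =====

-- number of positions j < k of ext with ext[j] == symbol (the quantity pref tabulates)
def pvCnt (ext s : List Char) (k : Nat) : Int := ((ext.take k).countP (fun c => decide ([c] = s)) : Int)

theorem pvCnt_succ (ext s : List Char) (k : Nat) (hk : k < ext.length) :
    pvCnt ext s (k + 1) = pvCnt ext s k + (if [ext[k]] = s then 1 else 0) := by
  simp only [pvCnt, List.take_add_one, List.getElem?_eq_getElem hk, Option.toList_some,
    List.countP_append, List.countP_singleton]
  by_cases h : [ext[k]] = s <;> simp [h]

theorem pvScanl_getElem? (s : List Char) (l : List Char) (t : Int) (k : Nat) (hk : k ≤ l.length) :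
    (l.scanl (fun t c => t + (if [c] = s then 1 else 0)) t)[k]? =
      some (t + pvCnt l s k) := by
  induction l generalizing t k with
  | nil =>
    have : k = 0 := Nat.le_zero.mp (by simpa using hk)
    subst this; simp [List.scanl, pvCnt]
  | cons c l ih =>
    cases k with
    | zero => simp [List.scanl_cons, pvCnt]
    | succ k =>
      have hk' : k ≤ l.length := by simpa using hk
      rw [List.scanl_cons, List.getElem?_cons_succ, ih _ k hk']
      have : pvCnt (c :: l) s (k + 1) = (if [c] = s then 1 else 0) + pvCnt l s k := by
        simp only [pvCnt, List.countP_cons, List.take_succ_cons]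
        by_cases h : [c] = s <;> simp [h] <;> ring
      rw [this]; ring_nf

theorem pvPref_eq (s ext : List Char) (k : Nat) (hk : k ≤ ext.length) :
    pvPref (ext.scanl (fun t c => t + (if [c] = s then 1 else 0)) 0) (k : Int) = pvCnt ext s k := by
  simp [pvPref, PySem.List.pyGet?_natCast, pvScanl_getElem? s ext 0 k hk]

-- B's closed-form value for entry i
def pvVal (ext s : List Char) (base : Int) (half : Nat) (i : Nat) : Int :=
  base - pvCnt ext s i + pvCnt ext s (i + half) - pvCnt ext s half

-- the main loop invariant: after the first m iterations the two dicts coincide and A's last entry is pvVal m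
theorem pvLoop (g s : List Char) (m : Nat) (hm : m + 1 ≤ g.length) :
    (PySem.List.pyRange 1 ((m : Int) + 1) 1).foldl
        (pvStepA (g ++ g.take (g.length / 2)) s ((g.length / 2 : Nat) : Int))
        (PySem.Dict.empty.insert 0 (pattern_count s (g.take (g.length / 2)))) =
      (PySem.List.pyRange 1 ((m : Int) + 1) 1).foldl
        (pvStepB ((g ++ g.take (g.length / 2)).scanl (fun t c => t + (if [c] = s then 1 else 0)) 0)
          (pattern_count s (g.take (g.length / 2))) ((g.length / 2 : Nat) : Int))
        (PySem.Dict.empty.insert 0 (pattern_count s (g.take (g.length / 2)))) ∧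
      ((PySem.List.pyRange 1 ((m : Int) + 1) 1).foldl
        (pvStepA (g ++ g.take (g.length / 2)) s ((g.length / 2 : Nat) : Int))
        (PySem.Dict.empty.insert 0 (pattern_count s (g.take (g.length / 2))))).getD (m : Int) 0 =
      pvVal (g ++ g.take (g.length / 2)) s (pattern_count s (g.take (g.length / 2))) (g.length / 2) m := by
  set E := g ++ g.take (g.length / 2) with hE
  set B := pattern_count s (g.take (g.length / 2)) with hB
  set H := g.length / 2 with hH
  have hHle : H ≤ g.length := Nat.div_le_self _ _
  have hElen : E.length = g.length + H := by
    simp [hE, List.length_take, Nat.min_eq_left hHle]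
  induction m with
  | zero =>
    rw [PySem.List.pyRange_one_eq_nil (by norm_num)]
    refine ⟨rfl, ?_⟩
    simp [PySem.Dict.getD_insert_self, pvVal, pvCnt]
  | succ m ih =>
    have hm' : m + 1 ≤ g.length := by omega
    obtain ⟨ihd, ihv⟩ := ih hm'
    have hsplit : PySem.List.pyRange 1 (((m + 1 : Nat) : Int) + 1) 1 =
        PySem.List.pyRange 1 ((m : Int) + 1) 1 ++ [(m : Int) + 1] := by
      have := PySem.List.pyRange_one_succ_right (a := 1) (b := (m : Int) + 1) (by omega)
      push_cast
      exact this
    rw [hsplit, List.foldl_append, List.foldl_append, List.foldl_cons, List.foldl_nil,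
      List.foldl_cons, List.foldl_nil]
    -- index facts
    have hmE : m < E.length := by omega
    have hmHE : m + H < E.length := by omega
    have hget1 : PySem.List.pyGet? E ((m : Nat) : Int) = some E[m] := by
      rw [PySem.List.pyGet?_natCast, List.getElem?_eq_getElem hmE]
    have hget2 : PySem.List.pyGet? E ((m : Int) + 1 + ((H : Nat) : Int) - 1) = some E[m + H] := by
      have : (m : Int) + 1 + ((H : Nat) : Int) - 1 = ((m + H : Nat) : Int) := by push_cast; ring
      rw [this, PySem.List.pyGet?_natCast, List.getElem?_eq_getElem hmHE]
    -- A's step value equals pvVal (m+1)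
    have hval : pvStepA E s ((H : Nat) : Int)
        ((PySem.List.pyRange 1 ((m : Int) + 1) 1).foldl (pvStepA E s ((H : Nat) : Int))
          (PySem.Dict.empty.insert 0 B)) ((m : Int) + 1) =
        ((PySem.List.pyRange 1 ((m : Int) + 1) 1).foldl (pvStepA E s ((H : Nat) : Int))
          (PySem.Dict.empty.insert 0 B)).insert ((m : Int) + 1)
          (pvVal E s B H (m + 1)) := by
      rw [pvStepA]
      have harg : (m : Int) + 1 - 1 = (m : Int) := by ring
      rw [harg, ihv, hget1, hget2]
      have h1 := pvCnt_succ E s m hmE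
      have h2 := pvCnt_succ E s (m + H) hmHE
      have hmm : m + H + 1 = m + 1 + H := by omega
      rw [hmm] at h2
      congr 1
      simp only [pvVal, Option.map_some, h1, h2]
      by_cases c1 : [E[m]] = s <;> by_cases c2 : [E[m + H]] = s <;> simp [c1, c2] <;> ring
    -- B's step value is also pvVal (m+1)
    have hvalB : pvStepB (E.scanl (fun t c => t + (if [c] = s then 1 else 0)) 0) B ((H : Nat) : Int)
        ((PySem.List.pyRange 1 ((m : Int) + 1) 1).foldl
          (pvStepB (E.scanl (fun t c => t + (if [c] = s then 1 else 0)) 0) B ((H : Nat) : Int))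
          (PySem.Dict.empty.insert 0 B)) ((m : Int) + 1) =
        ((PySem.List.pyRange 1 ((m : Int) + 1) 1).foldl
          (pvStepB (E.scanl (fun t c => t + (if [c] = s then 1 else 0)) 0) B ((H : Nat) : Int))
          (PySem.Dict.empty.insert 0 B)).insert ((m : Int) + 1)
          (pvVal E s B H (m + 1)) := by
      rw [pvStepB]
      have e1 : (m : Int) + 1 = ((m + 1 : Nat) : Int) := by push_cast; ring
      have e2 : (m : Int) + 1 + ((H : Nat) : Int) = ((m + 1 + H : Nat) : Int) := by push_cast; ring
      rw [e2, e1, pvPref_eq s E (m + 1) (by omega), pvPref_eq s E (m + 1 + H) (by omega),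
        pvPref_eq s E H (by omega)]
      rw [pvVal]
    rw [hval, hvalB, ihd]
    refine ⟨rfl, ?_⟩
    have hkey : ((m + 1 : Nat) : Int) = (m : Int) + 1 := by push_cast; ring
    rw [hkey, PySem.Dict.getD_insert_self]

theorem symbol_array_spec : Claim_equal_symbol_array := by
  intro genome symbol _
  unfold Spec_symbol_array symbol_array symbol_array_alt
  set g := genome.toList with hg
  set s := symbol.toList with hs
  have hfd : PySem.Int.floordiv ((g.length : Nat) : Int) 2 = ((g.length / 2 : Nat) : Int) := by
    exact_mod_cast PySem.Int.floordiv_natCast g.length 2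
  have hslice : PySem.List.slice g (some 0) (some ((g.length / 2 : Nat) : Int)) =
      g.take (g.length / 2) := by
    rw [PySem.List.slice_zero_start, PySem.List.slice_to_natCast]
  simp only [hfd, hslice]
  rcases Nat.eq_zero_or_pos g.length with hn | hpos
  · rw [hn]
    norm_num [PySem.List.pyRange_one_eq_nil]
  · obtain ⟨m, hn⟩ : ∃ m, g.length = m + 1 := ⟨g.length - 1, by omega⟩
    have h2 : ((g.length : Nat) : Int) = (m : Int) + 1 := by rw [hn]; push_cast; ring
    rw [h2, (pvLoop g s m (by omega)).1]
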